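-- pv_equiv track=rewrite | github.com/ricbencar/fenton-nolinear-calculator | pade/pade.py | get_term_names
-- ===== SOURCE A (Python) =====
-- def get_term_names(degree):
--     # Generates variable strings matching expand_poly_jit order
--     v = ['x0', 'x1', 'x2', 'x3']
--     names = ["1.0"]
--
--     # Linear
--     for i in range(4): names.append(v[i])
--     # Quadratic
--     for i in range(4):
--         for j in range(i, 4): names.append(f"{v[i]}*{v[j]}")
--     # Cubic
--     if degree >= 3:
--         for i in range(4):
--             for j in range(i, 4):
--                 for k in range(j, 4): names.append(f"{v[i]}*{v[j]}*{v[k]}")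
--     # Quartic
--     if degree >= 4:
--         for i in range(4):
--             for j in range(i, 4):
--                 for k in range(j, 4):
--                     for l in range(k, 4): names.append(f"{v[i]}*{v[j]}*{v[k]}*{v[l]}")
--     # Quintic
--     if degree >= 5:
--         for i in range(4):
--             for j in range(i, 4):
--                 for k in range(j, 4):
--                     for l in range(k, 4):
--                         for m in range(l, 4): names.append(f"{v[i]}*{v[j]}*{v[k]}*{v[l]}*{v[m]}")
--     # Sextic
--     if degree >= 6:
--         for i in range(4):
--             for j in range(i, 4):
--                 for k in range(j, 4):
--                     for l in range(k, 4):
--                         for m in range(l, 4):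
--                             for n in range(m, 4): names.append(f"{v[i]}*{v[j]}*{v[k]}*{v[l]}*{v[m]}*{v[n]}")
--     # Septic
--     if degree >= 7:
--         for i in range(4):
--             for j in range(i, 4):
--                 for k in range(j, 4):
--                     for l in range(k, 4):
--                         for m in range(l, 4):
--                             for n in range(m, 4):
--                                 for o in range(n, 4): names.append(f"{v[i]}*{v[j]}*{v[k]}*{v[l]}*{v[m]}*{v[n]}*{v[o]}")
--     return names
-- ===== SOURCE B (Python) =====
-- def get_term_names(degree):
--     # Enumerate each degree-d block via exponent vectors (c0,c1,c2,c3) with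
--     # c0+c1+c2+c3 = d (stars-and-bars), c0 descending, then c1, then c2;
--     # the term string is the variables repeated by their exponents.
--     top = min(7, max(2, degree))
--     names = ["1.0"]
--     for d in range(1, top + 1):
--         for c0 in range(d, -1, -1):
--             for c1 in range(d - c0, -1, -1):
--                 for c2 in range(d - c0 - c1, -1, -1):
--                     c3 = d - c0 - c1 - c2
--                     names.append('*'.join(['x0'] * c0 + ['x1'] * c1 + ['x2'] * c2 + ['x3'] * c3))
--     return names
-- ===== Notes on version B (the rewrite author's own statement) =====
-- stated objective: alternative
-- what changed: Replaces the hand-unrolled nested non-decreasing index loops over variable positions by a stars-and-bars enumeration: each degree-d term is an exponent vector (c0,c1,c2,c3) summing to d, iterated with descending counters, and the string is built by repeating each variable by its exponent.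
import Mathlib
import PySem

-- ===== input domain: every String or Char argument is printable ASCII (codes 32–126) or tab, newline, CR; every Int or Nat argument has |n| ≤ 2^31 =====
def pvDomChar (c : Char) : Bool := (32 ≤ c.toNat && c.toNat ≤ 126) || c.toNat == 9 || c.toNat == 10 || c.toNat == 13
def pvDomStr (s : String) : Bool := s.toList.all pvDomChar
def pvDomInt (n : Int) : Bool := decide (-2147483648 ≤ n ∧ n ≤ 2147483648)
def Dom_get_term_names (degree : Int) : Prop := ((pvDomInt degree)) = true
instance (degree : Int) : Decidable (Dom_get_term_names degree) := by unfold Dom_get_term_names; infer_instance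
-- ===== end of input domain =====

-- B enumerates each degree-d block as exponent vectors (c0,c1,c2,c3) summing to d instead of
-- A's hand-unrolled nested index loops (objective: alternative, same cost).

-- ===== PORT A =====
-- literal transliteration: each Python for-loop is a fold; range(i,4) is List.range' i (4-i);
-- v[i] (always in range here) is v.getD i ""; the f-string "{a}*{b}*…" is ported as
-- PySem.Str.join "*" [a, b, …] (exact: same '*'-separated concatenation, kernel-reducible).
def get_term_names (degree : Int) : List String :=
  let v : List String := ["x0", "x1", "x2", "x3"]
  let names : List String := ["1.0"]
  -- Linear
  let names := (List.range 4).foldl (fun ns i => ns ++ [v.getD i ""]) names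
  -- Quadratic
  let names := (List.range 4).foldl (fun ns i =>
    (List.range' i (4-i)).foldl (fun ns j =>
      ns ++ [PySem.Str.join "*" [v.getD i "", v.getD j ""]]) ns) names
  -- Cubic
  let names := if degree ≥ 3 then
    (List.range 4).foldl (fun ns i =>
      (List.range' i (4-i)).foldl (fun ns j =>
        (List.range' j (4-j)).foldl (fun ns k =>
          ns ++ [PySem.Str.join "*" [v.getD i "", v.getD j "", v.getD k ""]]) ns) ns) names
    else names
  -- Quartic
  let names := if degree ≥ 4 then
    (List.range 4).foldl (fun ns i =>
      (List.range' i (4-i)).foldl (fun ns j =>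
        (List.range' j (4-j)).foldl (fun ns k =>
          (List.range' k (4-k)).foldl (fun ns l =>
            ns ++ [PySem.Str.join "*" [v.getD i "", v.getD j "", v.getD k "", v.getD l ""]]) ns) ns) ns) names
    else names
  -- Quintic
  let names := if degree ≥ 5 then
    (List.range 4).foldl (fun ns i =>
      (List.range' i (4-i)).foldl (fun ns j =>
        (List.range' j (4-j)).foldl (fun ns k =>
          (List.range' k (4-k)).foldl (fun ns l =>
            (List.range' l (4-l)).foldl (fun ns m =>
              ns ++ [PySem.Str.join "*" [v.getD i "", v.getD j "", v.getD k "", v.getD l "", v.getD m ""]]) ns) ns) ns) ns) names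
    else names
  -- Sextic
  let names := if degree ≥ 6 then
    (List.range 4).foldl (fun ns i =>
      (List.range' i (4-i)).foldl (fun ns j =>
        (List.range' j (4-j)).foldl (fun ns k =>
          (List.range' k (4-k)).foldl (fun ns l =>
            (List.range' l (4-l)).foldl (fun ns m =>
              (List.range' m (4-m)).foldl (fun ns n =>
                ns ++ [PySem.Str.join "*" [v.getD i "", v.getD j "", v.getD k "", v.getD l "", v.getD m "", v.getD n ""]]) ns) ns) ns) ns) ns) names
    else names
  -- Septic
  let names := if degree ≥ 7 then
    (List.range 4).foldl (fun ns i =>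
      (List.range' i (4-i)).foldl (fun ns j =>
        (List.range' j (4-j)).foldl (fun ns k =>
          (List.range' k (4-k)).foldl (fun ns l =>
            (List.range' l (4-l)).foldl (fun ns m =>
              (List.range' m (4-m)).foldl (fun ns n =>
                (List.range' n (4-n)).foldl (fun ns o =>
                  ns ++ [PySem.Str.join "*" [v.getD i "", v.getD j "", v.getD k "", v.getD l "", v.getD m "", v.getD n "", v.getD o ""]]) ns) ns) ns) ns) ns) ns) names
    else names
  names

-- ===== PORT B =====
-- literal transliteration of Source B: range(a, -1, -1) is PySem.List.pyRange a (-1) (-1);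
-- ['x0'] * c is List.replicate c.toNat "x0" (exact: c ≥ 0 on every reached iteration);
-- '*'.join is PySem.Str.join "*".
def get_term_names_alt (degree : Int) : List String :=
  let top : Int := min 7 (max 2 degree)
  let names : List String := ["1.0"]
  (PySem.List.pyRange 1 (top + 1) 1).foldl (fun ns d =>
    (PySem.List.pyRange d (-1) (-1)).foldl (fun ns c0 =>
      (PySem.List.pyRange (d - c0) (-1) (-1)).foldl (fun ns c1 =>
        (PySem.List.pyRange (d - c0 - c1) (-1) (-1)).foldl (fun ns c2 =>
          let c3 := d - c0 - c1 - c2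
          ns ++ [PySem.Str.join "*"
            (List.replicate c0.toNat "x0" ++ List.replicate c1.toNat "x1" ++
             List.replicate c2.toNat "x2" ++ List.replicate c3.toNat "x3")]) ns) ns) ns) names

-- ===== PRECONDITION & SPEC =====
def Spec_get_term_names (degree : Int) (out : List String) : Prop := out = get_term_names_alt degree
instance (degree : Int) (out : List String) : Decidable (Spec_get_term_names degree out) := by unfold Spec_get_term_names; infer_instance

-- ===== CLAIM =====
def Claim_equal_get_term_names : Prop := ∀ (degree : Int), Dom_get_term_names degree → Spec_get_term_names degree (get_term_names degree)

-- ===== LEMMAS AND PROOFS =====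
-- B depends on degree only through the clamp top = min 7 (max 2 degree).
lemma get_term_names_alt_clamp (degree : Int) :
    get_term_names_alt degree = get_term_names_alt (min 7 (max 2 degree)) := by
  unfold get_term_names_alt
  have h : min 7 (max 2 (min 7 (max 2 degree))) = min 7 (max 2 degree) := by omega
  rw [h]

-- ===== VERDICT =====
set_option maxHeartbeats 2000000 in
set_option maxRecDepth 10000 in
theorem get_term_names_spec : Claim_equal_get_term_names := by
  intro degree _
  unfold Spec_get_term_names
  rw [get_term_names_alt_clamp]
  by_cases h2 : degree ≤ 2
  · rw [show min 7 (max 2 degree) = 2 by omega]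
    unfold get_term_names
    simp only [if_neg (show ¬ (degree ≥ 3) by omega), if_neg (show ¬ (degree ≥ 4) by omega),
      if_neg (show ¬ (degree ≥ 5) by omega), if_neg (show ¬ (degree ≥ 6) by omega),
      if_neg (show ¬ (degree ≥ 7) by omega)]
    decide
  · by_cases h7 : degree ≥ 7
    · rw [show min 7 (max 2 degree) = 7 by omega]
      unfold get_term_names
      simp only [if_pos (show degree ≥ 3 by omega), if_pos (show degree ≥ 4 by omega),
        if_pos (show degree ≥ 5 by omega), if_pos (show degree ≥ 6 by omega), if_pos h7]
      decide
    · have hlo : 3 ≤ degree := by omega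
      have hhi : degree ≤ 6 := by omega
      interval_cases degree <;> decide
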